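-- pv_equiv track=rewrite | github.com/MarcGiroPiraces/CodeWars | CodeWars18.py | string_letter_count
-- ===== SOURCE A (Python) =====
-- def string_letter_count(s):
--     paraula = ''
--     llistaRecompte = []
--     definitiu = ''
--     frase = s.lower()
--     for letters in frase:
--         if letters.isalpha() == True:
--             paraula += letters
--             paraula = sorted(paraula)
--     for elements in paraula:
--         llistaRecompte += [str(paraula.count(elements)) + elements]
--     llistaRecompte = list(dict.fromkeys(llistaRecompte))
--     definitiu = ''.join(llistaRecompte)
--     return definitiu
-- ===== SOURCE B (Python) =====
-- def string_letter_count(s):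
--     # one sort, then a single grouping pass (no repeated .count scans)
--     chars = sorted(c for c in s.lower() if c.isalpha())
--     out = ''
--     while chars:
--         c = chars[0]
--         run = 1
--         while run < len(chars) and chars[run] == c:
--             run += 1
--         out += str(run) + c
--         chars = chars[run:]
--     return out
-- ===== Notes on version B (the rewrite author's own statement) =====
-- stated objective: faster
-- what changed: A re-sorts the accumulated list after every alpha character and then counts each occurrence with a full-list .count scan followed by an ordered dedup; B sorts the filtered characters once and emits count+letter per run in a single grouping pass.
import Mathlib
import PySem

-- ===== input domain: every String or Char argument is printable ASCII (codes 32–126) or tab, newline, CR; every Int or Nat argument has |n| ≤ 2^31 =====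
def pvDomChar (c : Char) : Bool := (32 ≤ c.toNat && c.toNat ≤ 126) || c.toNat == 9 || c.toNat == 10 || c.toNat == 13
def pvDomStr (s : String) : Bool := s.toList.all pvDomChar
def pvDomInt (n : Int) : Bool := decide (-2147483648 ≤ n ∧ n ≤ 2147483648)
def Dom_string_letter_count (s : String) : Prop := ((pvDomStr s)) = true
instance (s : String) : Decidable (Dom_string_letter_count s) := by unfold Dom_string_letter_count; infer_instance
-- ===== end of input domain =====

-- B replaces A's per-character re-sort and per-occurrence full-list .count scans by one
-- sort of the filtered characters followed by a single grouping pass (objective: faster).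

-- ===== PORT A =====
def string_letter_count (s : String) : String :=
  -- frase = s.lower(); for letters in frase: if alpha: paraula += letters; paraula = sorted(paraula)
  let frase := PySem.Chars.lower s.toList
  let paraula := frase.foldl (fun p c =>
      if PySem.Chars.isalpha c then PySem.List.sorted (p ++ [c]) (fun x => x) false else p) []
  -- for elements in paraula: llistaRecompte += [str(paraula.count(elements)) + elements]
  let llistaRecompte := paraula.foldl (fun (acc : List (List Char)) e =>
      acc ++ [(PySem.Int.toStr ((PySem.List.count paraula e : Nat) : Int)).toList ++ [e]]) []
  -- llistaRecompte = list(dict.fromkeys(llistaRecompte)); return ''.join(llistaRecompte)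
  String.ofList (PySem.Chars.join [] (PySem.List.dedup llistaRecompte))

-- ===== PORT B =====
-- while chars: c = chars[0]; run = 1; while run < len(chars) and chars[run] == c: run += 1;
--              out += str(run) + c; chars = chars[run:]
def pvGroupLoop : List Char → List Char
  | [] => []
  | c :: rest =>
      let run : Nat := 1 + (rest.takeWhile (fun x => x == c)).length
      (PySem.Int.toStr (run : Int)).toList ++ [c] ++ pvGroupLoop (rest.dropWhile (fun x => x == c))
termination_by l => l.length
decreasing_by
  simp only [List.length_cons]
  exact Nat.lt_succ_of_le ((List.dropWhile_sublist _).length_le)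

def string_letter_count_alt (s : String) : String :=
  let chars := PySem.List.sorted ((PySem.Chars.lower s.toList).filter PySem.Chars.isalpha)
      (fun x => x) false
  String.ofList (pvGroupLoop chars)

-- ===== PRECONDITION & SPEC =====
def Spec_string_letter_count (s : String) (out : String) : Prop := out = string_letter_count_alt s
instance (s : String) (out : String) : Decidable (Spec_string_letter_count s out) := by unfold Spec_string_letter_count; infer_instance

-- ===== CLAIM (what is proved, stated in full; the proofs are below) =====
def Claim_equal_string_letter_count : Prop := ∀ (s : String), Dom_string_letter_count s → Spec_string_letter_count s (string_letter_count s)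

-- ===== LEMMAS AND PROOFS =====

-- A's first loop (re-sort after each appended alpha char) is one sort of the filtered list
theorem pvSortLoop (l : List Char) : ∀ (acc : List Char),
    l.foldl (fun p c => if PySem.Chars.isalpha c then PySem.List.sorted (p ++ [c]) (fun x => x) false else p)
      (PySem.List.sorted acc (fun x => x) false)
    = PySem.List.sorted (acc ++ l.filter PySem.Chars.isalpha) (fun x => x) false := by
  induction l with
  | nil => intro acc; simp
  | cons c l ih =>
    intro acc
    by_cases h : PySem.Chars.isalpha c
    · simp only [List.foldl_cons, h, if_pos]
      have hperm : (PySem.List.sorted acc (fun x => x) false ++ [c]).Perm (acc ++ [c]) :=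
        (PySem.List.sorted_perm acc (fun x => x) false).append_right [c]
      rw [PySem.List.sorted_eq_sorted_of_perm _ _ (fun x => x) (fun _ _ hab => hab) hperm,
        ih (acc ++ [c])]
      simp [h]
    · simp only [List.foldl_cons, h, if_neg, Bool.false_eq_true, not_false_iff]
      rw [ih acc]
      simp [h]

-- PySem.Set.add with an element already present at the head, repeated
theorem pvAddReplicate {α : Type} [BEq α] [LawfulBEq α] (x : α) :
    ∀ (n : Nat) (acc : PySem.Set α), x ∈ acc →
      List.foldl PySem.Set.add acc (List.replicate n x) = acc := by
  intro n
  induction n with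
  | zero => intro acc _; rfl
  | succ n ih =>
    intro acc hx
    simp only [List.replicate_succ, List.foldl_cons]
    have : PySem.Set.add acc x = acc := by
      simp [PySem.Set.add, List.contains_eq_mem, hx]
    rw [this]; exact ih acc hx

-- a head element never seen again commutes past the Set.add fold
theorem pvAddHead {α : Type} [BEq α] [LawfulBEq α] (x : α) :
    ∀ (ys : List α) (acc : List α), (∀ y ∈ ys, y ≠ x) →
      List.foldl PySem.Set.add (x :: acc) ys = x :: List.foldl PySem.Set.add acc ys := by
  intro ys
  induction ys with
  | nil => intro acc _; rfl
  | cons y ys ih =>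
    intro acc hy
    have hyx : y ≠ x := hy y (List.mem_cons_self)
    have : PySem.Set.add (x :: acc) y = x :: PySem.Set.add acc y := by
      simp only [PySem.Set.add]
      by_cases h : y ∈ acc
      · simp [h, hyx]
      · simp [h, hyx]
    simp only [List.foldl_cons, this]
    exact ih _ (fun z hz => hy z (List.mem_cons_of_mem _ hz))

theorem pvDedupRun {α : Type} [BEq α] [LawfulBEq α] (x : α) (n : Nat) (ys : List α)
    (h : ∀ y ∈ ys, y ≠ x) :
    PySem.List.dedup (x :: (List.replicate n x ++ ys)) = x :: PySem.List.dedup ys := by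
  simp only [PySem.List.dedup, PySem.Set.ofList, List.foldl_cons, List.foldl_append]
  have h0 : PySem.Set.add PySem.Set.empty x = [x] := by
    simp [PySem.Set.add, PySem.Set.empty]
  rw [h0, pvAddReplicate x n [x] (List.mem_singleton.2 rfl)]
  exact pvAddHead x ys PySem.Set.empty h

theorem pvJoinCons (p : List Char) (rest : List (List Char)) :
    PySem.Chars.join [] (p :: rest) = p ++ PySem.Chars.join [] rest := by
  cases rest with
  | nil => simp [PySem.Chars.join, List.intercalate]
  | cons q r => rw [PySem.Chars.join_cons_cons]; simp

theorem pvDropWhileHead {α : Type} (p : α → Bool) :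
    ∀ (l : List α) (b : α) (tl : List α), List.dropWhile p l = b :: tl → p b = false := by
  intro l
  induction l with
  | nil => intro b tl h; simp at h
  | cons a l ih =>
    intro b tl h
    by_cases hpa : p a = true
    · rw [List.dropWhile_cons_of_pos hpa] at h; exact ih _ _ h
    · rw [List.dropWhile_cons_of_neg hpa] at h
      cases h; simpa using hpa

-- main grouping lemma: on a sorted list, A's count-then-dedup pass is B's single grouping pass
theorem pvMain : ∀ (L : List Char), L.Pairwise (· ≤ ·) →
    PySem.Chars.join [] (PySem.List.dedup (L.map (fun e =>
        (PySem.Int.toStr ((PySem.List.count L e : Nat) : Int)).toList ++ [e])))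
    = pvGroupLoop L := by
  intro L
  induction L using pvGroupLoop.induct with
  | case1 => intro _; simp [pvGroupLoop, PySem.List.dedup, PySem.Set.ofList, PySem.Set.empty,
      PySem.Chars.join_nil]
  | case2 c rest ih =>
    intro hpw
    set t := rest.takeWhile (fun x => x == c) with ht
    set d := rest.dropWhile (fun x => x == c) with hd
    have hrest : t ++ d = rest := List.takeWhile_append_dropWhile
    have htc : ∀ x ∈ t, x = c := by
      intro x hx
      exact eq_of_beq (List.mem_takeWhile_imp (p := fun x => x == c) (l := rest) hx)
    have hcle : ∀ x ∈ rest, c ≤ x := by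
      intro x hx; exact (List.pairwise_cons.1 hpw).1 x hx
    have hdsub : d.Sublist rest := List.dropWhile_sublist _
    have hdpw : d.Pairwise (· ≤ ·) := ((List.pairwise_cons.1 hpw).2).sublist hdsub
    have hdne : ∀ x ∈ d, c < x := by
      intro x hx
      cases hdd : d with
      | nil => rw [hdd] at hx; simp at hx
      | cons h0 d' =>
        have hh0 : ¬ (h0 == c) = true := by
          have := pvDropWhileHead (fun x => x == c) rest h0 d' (by rw [← hd, hdd])
          simpa using this
        have hh0c : h0 ≠ c := fun he => hh0 (by simp [he])
        have hch0 : c < h0 :=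
          lt_of_le_of_ne (hcle h0 (hdsub.mem (hdd ▸ List.mem_cons_self))) (Ne.symm hh0c)
        rw [hdd] at hx
        rcases List.mem_cons.1 hx with he | hm
        · rw [he]; exact hch0
        · exact lt_of_lt_of_le hch0 ((List.pairwise_cons.1 (hdd ▸ hdpw)).1 x hm)
    -- counts
    have hLeq : c :: rest = c :: (t ++ d) := by rw [hrest]
    have hcount_c : PySem.List.count (c :: rest) c = 1 + t.length := by
      rw [hLeq]
      simp only [PySem.List.count, List.count_cons, List.count_append]
      have h1 : t.count c = t.length := List.count_eq_length.2 (fun y hy => by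
        simp [htc y hy])
      have h2 : d.count c = 0 := List.count_eq_zero.2 (fun hc => lt_irrefl c (hdne c hc))
      simp [h1, h2]; omega
    have hcount_d : ∀ e ∈ d, PySem.List.count (c :: rest) e = PySem.List.count d e := by
      intro e he
      have hec : e ≠ c := fun h => lt_irrefl c (h ▸ hdne e he)
      rw [hLeq]
      simp only [PySem.List.count, List.count_cons, List.count_append]
      have h1 : t.count e = 0 := List.count_eq_zero.2 (fun hc => hec (htc e hc))
      simp [h1, Ne.symm hec]
    -- the item maps
    have hmapt : t.map (fun e => (PySem.Int.toStr ((PySem.List.count (c :: rest) e : Nat) : Int)).toList ++ [e])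
        = List.replicate t.length ((PySem.Int.toStr ((PySem.List.count (c :: rest) c : Nat) : Int)).toList ++ [c]) := by
      have hlen : t.length = (t.map (fun e => (PySem.Int.toStr ((PySem.List.count (c :: rest) e : Nat) : Int)).toList ++ [e])).length := by
        simp
      rw [hlen]
      apply List.eq_replicate_of_mem
      intro y hy
      rcases List.mem_map.1 hy with ⟨e, he, rfl⟩
      rw [htc e he]
    have hmapd : d.map (fun e => (PySem.Int.toStr ((PySem.List.count (c :: rest) e : Nat) : Int)).toList ++ [e])
        = d.map (fun e => (PySem.Int.toStr ((PySem.List.count d e : Nat) : Int)).toList ++ [e]) := by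
      apply List.map_congr_left
      intro e he; rw [hcount_d e he]
    have hneq : ∀ y ∈ d.map (fun e => (PySem.Int.toStr ((PySem.List.count d e : Nat) : Int)).toList ++ [e]),
        y ≠ (PySem.Int.toStr ((PySem.List.count (c :: rest) c : Nat) : Int)).toList ++ [c] := by
      intro y hy heq
      rcases List.mem_map.1 hy with ⟨e, he, rfl⟩
      have : e = c := by
        have := congrArg List.getLast? heq
        simpa using this
      exact lt_irrefl c (this ▸ hdne e he)
    -- assemble
    conv_lhs => rw [show (c :: rest) = c :: (t ++ d) from hLeq]
    rw [List.map_cons, List.map_append]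
    rw [← hLeq, hmapt, hmapd]
    rw [pvDedupRun _ t.length _ hneq, pvJoinCons]
    rw [ih hdpw]
    rw [pvGroupLoop]
    simp only [hcount_c]
    rfl

theorem string_letter_count_spec : Claim_equal_string_letter_count := by
  intro s _
  unfold Spec_string_letter_count
  simp only [string_letter_count, string_letter_count_alt]
  have h1 := pvSortLoop (PySem.Chars.lower s.toList) []
  simp only [List.nil_append] at h1
  have hsnil : PySem.List.sorted ([] : List Char) (fun x => x) false = [] := rfl
  rw [hsnil] at h1
  rw [h1]
  rw [PySem.List.foldl_append_singleton_eq_map]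
  simp only [List.nil_append]
  rw [pvMain _ (by
    have := PySem.List.sorted_pairwise ((PySem.Chars.lower s.toList).filter PySem.Chars.isalpha) (fun x => x)
    simpa using this)]
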